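-- pv_equiv track=rewrite | github.com/massionb/Master_thesis_Bastien_Massion | Data_thesis.py | notNoneIndices
-- ===== SOURCE A (Python) =====
-- def notNoneIndices(data,types):
--     notNoneData = []
--     for i in range(len(types)):
--         notNoneFeature = []
--         for j in range(len(data)):
--             if data[j][i] != None:
--                 notNoneFeature.append(j)
--         notNoneData.append(notNoneFeature)
--     return notNoneData
-- ===== SOURCE B (Python) =====
-- def notNoneIndices(data, types):
--     result = [[] for _ in types]
--     for j, row in enumerate(data):
--         result = [(acc + [j]) if row[i] != None else acc for i, acc in enumerate(result)]
--     return result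
-- ===== Notes on version B (the rewrite author's own statement) =====
-- stated objective: alternative
-- what changed: B makes a single row-major pass over the matrix, rebuilding all per-feature index lists at once per row, instead of A's column-by-column rescanning of all rows per feature.
import Mathlib
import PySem

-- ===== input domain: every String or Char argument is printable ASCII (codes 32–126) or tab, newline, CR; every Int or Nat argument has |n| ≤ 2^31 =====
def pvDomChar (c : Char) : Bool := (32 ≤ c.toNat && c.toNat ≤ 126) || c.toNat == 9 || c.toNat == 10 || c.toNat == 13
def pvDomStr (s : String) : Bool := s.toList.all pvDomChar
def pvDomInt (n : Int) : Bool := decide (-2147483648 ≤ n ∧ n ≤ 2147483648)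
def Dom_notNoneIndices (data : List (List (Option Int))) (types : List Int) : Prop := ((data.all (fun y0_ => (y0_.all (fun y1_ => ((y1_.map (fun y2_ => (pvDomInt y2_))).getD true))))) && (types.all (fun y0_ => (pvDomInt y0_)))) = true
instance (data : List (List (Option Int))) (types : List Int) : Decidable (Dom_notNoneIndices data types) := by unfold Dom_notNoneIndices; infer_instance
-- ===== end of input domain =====

-- B rebuilds all per-feature index lists in ONE row-major pass over the matrix, instead of A's
-- column-by-column rescan of all rows per feature (objective: alternative decomposition, same cost).


-- ===== PORT A =====
-- literal port of A: outer loop over feature index i, inner loop over row index j,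
-- appending j when data[j][i] != None (indexing via getD; Pre_ keeps every index in range)
def notNoneIndices (data : List (List (Option Int))) (types : List Int) : List (List Int) :=
  (List.range types.length).foldl
    (fun notNoneData i =>
      notNoneData ++ [(List.range data.length).foldl
        (fun notNoneFeature j =>
          if !((data.getD j []).getD i none == none) then notNoneFeature ++ [(j : Int)]
          else notNoneFeature) []])
    []

-- ===== PORT B =====
-- literal port of B: result starts as one [] per feature; one fold over enumerate(data),
-- each row rebuilding every per-feature list by a comprehension over enumerate(result)
def notNoneIndices_alt (data : List (List (Option Int))) (types : List Int) : List (List Int) :=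
  (PySem.List.enumerate data).foldl
    (fun result jr =>
      (PySem.List.enumerate result).map
        (fun p => if !(PySem.List.pyGetD jr.2 p.1 none == none) then p.2 ++ [jr.1] else p.2))
    (types.map (fun _ => ([] : List Int)))

-- ===== PRECONDITION & SPEC =====
-- Pre_ excludes exactly the inputs on which A raises IndexError: a row shorter than types
-- (data[j][i] with i up to len(types)-1); A returns normally on every other input.
def Pre_notNoneIndices (data : List (List (Option Int))) (types : List Int) : Prop :=
  ∀ row ∈ data, types.length ≤ row.length
instance (data : List (List (Option Int))) (types : List Int) : Decidable (Pre_notNoneIndices data types) := by unfold Pre_notNoneIndices; infer_instance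

def pvWitness_notNoneIndices : List (List (Option Int)) × List Int :=
  ([[some 1, none], [none, some 2]], [0, 1])

def Spec_notNoneIndices (data : List (List (Option Int))) (types : List Int) (out : List (List Int)) : Prop := out = notNoneIndices_alt data types
instance (data : List (List (Option Int))) (types : List Int) (out : List (List Int)) : Decidable (Spec_notNoneIndices data types out) := by unfold Spec_notNoneIndices; infer_instance

-- ===== CLAIM (what is proved, stated in full; the proofs are below) =====
def Claim_equal_notNoneIndices : Prop := ∀ (data : List (List (Option Int))) (types : List Int), Dom_notNoneIndices data types → Pre_notNoneIndices data types → Spec_notNoneIndices data types (notNoneIndices data types)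

-- ===== LEMMAS AND PROOFS =====

-- a list of singletons flattens to the list of their elements (used to normalise both closed forms)
lemma pv_flatten_map_singleton {α β : Type} (f : α → β) (l : List α) :
    (l.map (fun x => [f x])).flatten = l.map f := by
  induction l with
  | nil => rfl
  | cons a l ih => simp [ih]

-- B's per-row step on a list of shape (range L).map f keeps that shape
lemma pv_step_shape (L : Nat) (f : Nat → List Int) (jr : Int × List (Option Int)) :
    (PySem.List.enumerate ((List.range L).map f)).map
      (fun p => if !(PySem.List.pyGetD jr.2 p.1 none == none) then p.2 ++ [jr.1] else p.2)
    = (List.range L).map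
        (fun (i : Nat) => if !(PySem.List.pyGetD jr.2 (i : Int) none == none) then f i ++ [jr.1] else f i) := by
  rw [PySem.List.enumerate_eq_map_pyRange _ ([] : List Int)]
  simp only [PySem.List.len_eq, List.length_map, List.length_range, PySem.List.pyRange_zero_nat,
    List.map_map]
  apply List.map_congr_left
  intro k hk
  simp only [Function.comp, PySem.List.pyGetD_natCast]
  rw [PySem.List.getD_map_range f L k [] (List.mem_range.mp hk)]

-- invariant of B's fold over the enumerated rows: every per-feature list grows by the
-- indices of the rows whose i-th entry is not None
lemma pv_fold_inv (rows : List (Int × List (Option Int))) (L : Nat) (f : Nat → List Int) :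
    rows.foldl
      (fun result jr =>
        (PySem.List.enumerate result).map
          (fun p => if !(PySem.List.pyGetD jr.2 p.1 none == none) then p.2 ++ [jr.1] else p.2))
      ((List.range L).map f)
    = (List.range L).map
        (fun (i : Nat) => f i ++ (rows.filter (fun jr => !(PySem.List.pyGetD jr.2 (i : Int) none == none))).map (·.1)) := by
  induction rows generalizing f with
  | nil => simp
  | cons jr rs ih =>
    rw [List.foldl_cons, pv_step_shape, ih]
    apply List.map_congr_left
    intro k _
    simp only [List.filter_cons]
    split_ifs with h1 <;> simp_all [List.append_assoc]

-- closed form of B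
lemma pv_alt_char (data : List (List (Option Int))) (types : List Int) :
    notNoneIndices_alt data types
    = (List.range types.length).map
        (fun i => ((List.range data.length).filter
            (fun j => !((data.getD j []).getD i none == none))).map (fun j => (j : Int))) := by
  unfold notNoneIndices_alt
  have hinit : types.map (fun _ => ([] : List Int))
      = (List.range types.length).map (fun _ => ([] : List Int)) := by simp
  rw [hinit, pv_fold_inv]
  simp only [List.nil_append]
  apply List.map_congr_left
  intro i _
  rw [PySem.List.enumerate_eq_map_pyRange data ([] : List (Option Int))]
  simp [List.filter_map, PySem.List.len_eq, PySem.List.pyRange_zero_nat, List.map_map,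
    Function.comp_def, List.flatMap, pv_flatten_map_singleton]

-- closed form of A
lemma pv_a_char (data : List (List (Option Int))) (types : List Int) :
    notNoneIndices data types
    = (List.range types.length).map
        (fun i => ((List.range data.length).filter
            (fun j => !((data.getD j []).getD i none == none))).map (fun j => (j : Int))) := by
  simp [notNoneIndices, PySem.List.foldl_append_if, List.flatMap, pv_flatten_map_singleton]

-- ===== VERDICT (by name: the statement is the Claim_ definition above) =====
theorem notNoneIndices_spec : Claim_equal_notNoneIndices := by
  intro data types _ _
  unfold Spec_notNoneIndices
  rw [pv_a_char, pv_alt_char]
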